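-- pv_equiv track=rewrite | github.com/nsiicm0/project_euler | 5/impl2.py | get_test_numbers
-- ===== SOURCE A (Python) =====
-- def get_test_numbers(n:int) -> int:
--     '''We will only test the largest multiples
--     for instance we will not test 2 and 4 if we are gonna test 8.
--     '''
--     candidates = range(2, n+1)
--     for i, candidate in enumerate(candidates):
--         ret = True
--         for next_candidate in candidates[i+1:]:
--             if next_candidate % candidate == 0:
--                 ret = False
--                 break
--         if ret:
--             yield candidate
-- ===== SOURCE B (Python) =====
-- def get_test_numbers(n: int) -> int:
--     '''A candidate c in [2, n] has a larger multiple in the range iff 2*c <= n,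
--     so exactly the numbers above n//2 survive: yield them directly.'''
--     yield from range(max(2, n // 2 + 1), n + 1)
-- ===== Notes on version B (the rewrite author's own statement) =====
-- stated objective: faster
-- what changed: Replaced the quadratic double scan (checking each candidate against every larger one for divisibility) by the closed form: c in [2,n] has no larger multiple in the range iff 2c > n, so B yields range(max(2, n//2+1), n+1) directly.
import Mathlib
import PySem

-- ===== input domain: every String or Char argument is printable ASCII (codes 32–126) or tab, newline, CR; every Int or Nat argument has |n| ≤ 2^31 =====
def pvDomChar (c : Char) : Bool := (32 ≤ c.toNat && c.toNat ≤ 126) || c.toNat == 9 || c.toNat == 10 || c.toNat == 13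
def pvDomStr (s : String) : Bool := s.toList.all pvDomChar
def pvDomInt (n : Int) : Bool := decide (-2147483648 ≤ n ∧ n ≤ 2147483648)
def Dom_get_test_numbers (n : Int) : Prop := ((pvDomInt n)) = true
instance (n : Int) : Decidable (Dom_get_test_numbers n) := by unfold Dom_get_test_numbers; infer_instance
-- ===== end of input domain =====

-- B replaces A's quadratic divisibility double scan by the closed form
-- "c survives iff 2*c > n", yielding range(max(2, n//2+1), n+1) directly (objective: faster).
-- A is a generator in Python; both ports return the list of yielded values.

-- ===== PORT A =====
-- for each (i, candidate) of enumerate(range(2, n+1)): keep candidate iff the scan over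
-- candidates[i+1:] finds no multiple (the inner for/break flag is the List.all of the negated test)
def get_test_numbers (n : Int) : List Int :=
  let candidates := PySem.List.pyRange 2 (n + 1) 1
  (PySem.List.enumerate candidates 0).foldl
    (fun acc ic =>
      if (PySem.List.slice candidates (some (ic.1 + 1)) none).all
          (fun nc => !(PySem.Int.mod nc ic.2 == 0))
      then acc ++ [ic.2] else acc)
    []

-- ===== PORT B =====
def get_test_numbers_alt (n : Int) : List Int :=
  PySem.List.pyRange (max 2 (PySem.Int.floordiv n 2 + 1)) (n + 1) 1

-- ===== PRECONDITION & SPEC =====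
def Spec_get_test_numbers (n : Int) (out : List Int) : Prop := out = get_test_numbers_alt n
instance (n : Int) (out : List Int) : Decidable (Spec_get_test_numbers n out) := by unfold Spec_get_test_numbers; infer_instance

-- ===== CLAIM (what is proved, stated in full; the proofs are below) =====
def Claim_equal_get_test_numbers : Prop := ∀ (n : Int), Dom_get_test_numbers n → Spec_get_test_numbers n (get_test_numbers n)

-- ===== LEMMAS AND PROOFS =====

lemma drop_pyRange (k : Nat) (a b : Int) :
    (PySem.List.pyRange a b 1).drop k = PySem.List.pyRange (a + k) b 1 := by
  induction k generalizing a with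
  | zero => simp
  | succ k ih =>
    rcases (by omega : b ≤ a ∨ a < b) with h | h
    · rw [PySem.List.pyRange_one_eq_nil h, PySem.List.pyRange_one_eq_nil (by push_cast; omega)]
      simp
    · rw [PySem.List.pyRange_one_cons h, List.drop_succ_cons, ih (a + 1)]
      congr 1
      push_cast
      ring

-- the inner scan of A succeeds exactly when candidate c (2 ≤ c) has no multiple ≤ n, i.e. n < 2*c
lemma inner_all_iff (n c : Int) (h2 : 2 ≤ c) :
    ((PySem.List.pyRange (c + 1) (n + 1) 1).all
      (fun nc => !(PySem.Int.mod nc c == 0)) = true) ↔ n < 2 * c := by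
  simp only [List.all_eq_true, Bool.not_eq_eq_eq_not, Bool.not_true, beq_eq_false_iff_ne,
    ne_eq, PySem.List.mem_pyRange_one]
  constructor
  · intro h
    by_contra hn
    rw [not_lt] at hn
    have := h (2 * c) ⟨by omega, by omega⟩
    exact this ((PySem.Int.mod_eq_zero_iff_dvd _ _).mpr ⟨2, by ring⟩)
  · rintro hn nc ⟨hlo, hhi⟩ hmod
    obtain ⟨k, hk⟩ := (PySem.Int.mod_eq_zero_iff_dvd _ _).mp hmod
    have hk2 : 2 ≤ k := by nlinarith
    nlinarith

lemma filter_range_eq (n : Int) :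
    (PySem.List.pyRange 2 (n + 1) 1).filter
      (fun c => (PySem.List.pyRange (c + 1) (n + 1) 1).all
        (fun nc => !(PySem.Int.mod nc c == 0)))
    = PySem.List.pyRange (max 2 (PySem.Int.floordiv n 2 + 1)) (n + 1) 1 := by
  set m := max 2 (PySem.Int.floordiv n 2 + 1) with hm
  rcases (by omega : n + 1 ≤ 2 ∨ 2 < n + 1) with hn | hn
  · rw [PySem.List.pyRange_one_eq_nil hn, PySem.List.pyRange_one_eq_nil (by omega)]
    rfl
  · have hd1 : PySem.Int.floordiv n 2 < m := by omega
    have hd2 : 2 * (PySem.Int.floordiv n 2) ≤ n := by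
      have := (PySem.Int.le_floordiv_iff_mul_le (a := n) (b := 2)
        (q := PySem.Int.floordiv n 2) (by omega)).mp le_rfl
      omega
    have hmn : m ≤ n + 1 := by omega
    rw [PySem.List.pyRange_one_append 2 m (n + 1) (by omega) hmn, List.filter_append]
    have h1 : (PySem.List.pyRange 2 m 1).filter
        (fun c => (PySem.List.pyRange (c + 1) (n + 1) 1).all
          (fun nc => !(PySem.Int.mod nc c == 0))) = [] := by
      rw [List.filter_eq_nil_iff]
      intro c hc
      rw [PySem.List.mem_pyRange_one] at hc
      rw [inner_all_iff n c hc.1, not_lt]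
      -- c < m = max 2 (n//2+1) and 2 ≤ c force c ≤ n//2, hence 2*c ≤ n
      have hcle : c ≤ PySem.Int.floordiv n 2 := by omega
      have := (PySem.Int.le_floordiv_iff_mul_le (a := n) (b := 2) (q := c) (by omega)).mp hcle
      omega
    have h2 : (PySem.List.pyRange m (n + 1) 1).filter
        (fun c => (PySem.List.pyRange (c + 1) (n + 1) 1).all
          (fun nc => !(PySem.Int.mod nc c == 0))) = PySem.List.pyRange m (n + 1) 1 := by
      rw [List.filter_eq_self]
      intro c hc
      rw [PySem.List.mem_pyRange_one] at hc
      have h2c : 2 ≤ c := le_trans (le_max_left _ _) hc.1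
      rw [inner_all_iff n c h2c]
      have : PySem.Int.floordiv n 2 < c := by omega
      have := (PySem.Int.floordiv_lt_iff_lt_mul (a := n) (b := 2) (q := c) (by omega)).mp this
      omega
    rw [h1, h2, List.nil_append]

theorem get_test_numbers_eq (n : Int) : get_test_numbers n = get_test_numbers_alt n := by
  unfold get_test_numbers get_test_numbers_alt
  rw [PySem.List.foldl_congr_mem
    (g := fun acc (ic : Int × Int) =>
      if (PySem.List.pyRange (ic.2 + 1) (n + 1) 1).all
          (fun nc => !(PySem.Int.mod nc ic.2 == 0))
      then acc ++ [ic.2] else acc)]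
  · have hmap : PySem.List.pyRange 2 (n + 1) 1
        = (PySem.List.enumerate (PySem.List.pyRange 2 (n + 1) 1) 0).map (·.2) :=
      (PySem.List.map_snd_enumerate _ _).symm
    rw [show (PySem.List.enumerate (PySem.List.pyRange 2 (n + 1) 1) 0).foldl
        (fun acc (ic : Int × Int) =>
          if (PySem.List.pyRange (ic.2 + 1) (n + 1) 1).all
              (fun nc => !(PySem.Int.mod nc ic.2 == 0))
          then acc ++ [ic.2] else acc) []
      = (PySem.List.pyRange 2 (n + 1) 1).foldl
        (fun acc c =>
          if (PySem.List.pyRange (c + 1) (n + 1) 1).all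
              (fun nc => !(PySem.Int.mod nc c == 0))
          then acc ++ [c] else acc) [] from by
        conv_rhs => rw [hmap, List.foldl_map]]
    rw [PySem.List.foldl_append_if_eq_filter, List.nil_append, filter_range_eq]
  · intro acc ic hic
    rw [PySem.List.mem_enumerate_iff] at hic
    obtain ⟨k, hk, rfl⟩ := hic
    have hkv : (PySem.List.pyRange 2 (n + 1) 1)[k] = 2 + (k : Int) :=
      PySem.List.getElem_pyRange_one ..
    have hslice : PySem.List.slice (PySem.List.pyRange 2 (n + 1) 1) (some (0 + (k : Int) + 1)) none
        = PySem.List.pyRange ((PySem.List.pyRange 2 (n + 1) 1)[k] + 1) (n + 1) 1 := by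
      rw [PySem.List.slice_from _ (by omega), hkv, drop_pyRange]
      · congr 1
        omega
    simp only [hslice]

-- ===== VERDICT (by name: the statement is the Claim_ definition above) =====
theorem get_test_numbers_spec : Claim_equal_get_test_numbers := by
  intro n _
  unfold Spec_get_test_numbers
  exact get_test_numbers_eq n
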